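-- pv_equiv track=rewrite | github.com/francofranzini/Programacion | Python/Practica3.py | cuantas_mas_5
-- ===== SOURCE A (Python) =====
-- def cuantas_mas_5(cadena = ""):
--     contador = 0
--     pmas5 = 0
--     for letra in cadena:
--         contador += 1
--         if letra == " ":
--             contador = 0
--         if contador == 5:
--             pmas5 += 1
--     return pmas5
-- ===== SOURCE B (Python) =====
-- def cuantas_mas_5(cadena = ""):
--     return sum(1 for w in cadena.split(" ") if len(w) >= 5)
-- ===== Notes on version B (the rewrite author's own statement) =====
-- stated objective: idiomatic
-- what changed: Replaces the character-by-character running counter that resets on spaces with a split-on-space tokenization followed by a single count of words of length >= 5.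
import Mathlib
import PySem

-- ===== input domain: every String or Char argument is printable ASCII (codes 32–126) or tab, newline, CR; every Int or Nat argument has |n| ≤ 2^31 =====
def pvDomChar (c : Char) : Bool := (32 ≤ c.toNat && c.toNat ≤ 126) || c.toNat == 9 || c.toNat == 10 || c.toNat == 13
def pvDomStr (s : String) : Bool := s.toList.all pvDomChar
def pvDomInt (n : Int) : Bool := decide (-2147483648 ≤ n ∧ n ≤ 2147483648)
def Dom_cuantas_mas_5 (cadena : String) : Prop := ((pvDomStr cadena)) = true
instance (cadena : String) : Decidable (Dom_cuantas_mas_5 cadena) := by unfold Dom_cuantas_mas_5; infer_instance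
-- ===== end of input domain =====

-- B replaces A's char-by-char counter (reset on spaces) with split(" ") plus one count pass (idiomatic).
-- ===== PORT A =====
def cuantas_mas_5 (cadena : String) : Int :=
  (cadena.toList.foldl (fun st letra =>
      let contador := st.1 + 1
      let contador := if letra == ' ' then 0 else contador
      let pmas5 := if contador == 5 then st.2 + 1 else st.2
      (contador, pmas5)) ((0 : Int), (0 : Int))).2

-- ===== PORT B =====
-- Source B's cadena.split(" ") (single-char separator) is ported as List.splitOn ' '.
def cuantas_mas_5_alt (cadena : String) : Int :=
  ((cadena.toList.splitOn ' ').countP (fun w => decide (5 ≤ w.length)) : Int)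

-- ===== PRECONDITION & SPEC =====
def Spec_cuantas_mas_5 (cadena : String) (out : Int) : Prop := out = cuantas_mas_5_alt cadena
instance (cadena : String) (out : Int) : Decidable (Spec_cuantas_mas_5 cadena out) := by unfold Spec_cuantas_mas_5; infer_instance

-- ===== CLAIM (what is proved, stated in full; the proofs are below) =====
def Claim_equal_cuantas_mas_5 : Prop := ∀ (cadena : String), Dom_cuantas_mas_5 cadena → Spec_cuantas_mas_5 cadena (cuantas_mas_5 cadena)

-- ===== LEMMAS AND PROOFS =====

-- contribution of the parts list when the current run already has `cont` characters
def pvG (cont : Int) : List (List Char) → Int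
  | [] => 0
  | h :: t => (if cont < 5 ∧ 5 ≤ cont + (h.length : Int) then 1 else 0)
      + (t.countP (fun w => decide (5 ≤ w.length)) : Int)

theorem pvG_cons (cont : Int) (h : List Char) (t : List (List Char)) :
    pvG cont (h :: t) = (if cont < 5 ∧ 5 ≤ cont + (h.length : Int) then 1 else 0)
      + (t.countP (fun w => decide (5 ≤ w.length)) : Int) := rfl

theorem pvG_zero (parts : List (List Char)) (h : parts ≠ []) :
    pvG 0 parts = (parts.countP (fun w => decide (5 ≤ w.length)) : Int) := by
  cases parts with
  | nil => exact absurd rfl h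
  | cons a t =>
    simp only [pvG, List.countP_cons]
    by_cases h5 : 5 ≤ a.length
    · have h0 : (0 : Int) < 5 ∧ 5 ≤ 0 + (a.length : Int) := by constructor <;> omega
      simp [h0, h5]
      ring
    · simp [h5]

theorem pvMain (cs : List Char) : ∀ (cont p : Int), 0 ≤ cont →
    (cs.foldl (fun st letra =>
      let contador := st.1 + 1
      let contador := if letra == ' ' then 0 else contador
      let pmas5 := if contador == 5 then st.2 + 1 else st.2
      (contador, pmas5)) (cont, p)).2
      = p + pvG cont (cs.splitOnP (· == ' ')) := by
  induction cs with
  | nil =>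
    intro cont p hc
    simp [List.splitOnP_nil, pvG]
  | cons c cs ih =>
    intro cont p hc
    simp only [List.foldl_cons]
    by_cases hsp : c = ' '
    · have hne := List.splitOnP_ne_nil (fun x => x == ' ') cs
      simp only [hsp, beq_self_eq_true, if_true, if_neg (by decide : ¬ ((0:Int) == 5) = true)]
      rw [ih 0 p (by omega)]
      rw [List.splitOnP_cons, if_pos (by simp : ((' ' == ' ') = true))]
      rw [pvG_zero _ hne]
      have hng : ¬ (cont < 5 ∧ 5 ≤ cont + (([] : List Char).length : Int)) := by
        intro ⟨h1, h2⟩; simp at h2; omega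
      cases h : cs.splitOnP (· == ' ') with
      | nil => exact absurd h hne
      | cons a t => simp only [pvG_cons, hng, if_false, List.countP_cons]; push_cast; ring
    · obtain ⟨h, t, hht⟩ := List.exists_cons_of_ne_nil (List.splitOnP_ne_nil (fun x => x == ' ') cs)
      have hb : (c == ' ') = false := by simpa using hsp
      simp only [hb, Bool.false_eq_true, if_false, List.splitOnP_cons]
      rw [ih (cont + 1) _ (by omega), hht]
      simp only [List.modifyHead, pvG_cons, List.length_cons, beq_iff_eq]
      push_cast
      split_ifs <;> omega

-- ===== VERDICT (by name: the statement is the Claim_ definition above) =====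
theorem cuantas_mas_5_spec : Claim_equal_cuantas_mas_5 := by
  unfold Claim_equal_cuantas_mas_5
  intro cadena _
  unfold Spec_cuantas_mas_5 cuantas_mas_5 cuantas_mas_5_alt
  rw [pvMain cadena.toList 0 0 le_rfl, pvG_zero _ (List.splitOnP_ne_nil _ _)]
  simp [List.splitOn]
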